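-- pv_equiv track=rewrite | github.com/mkg880/leetcode | 1702_Maximum_Binary_String_After_Change.py | maximumBinaryString
-- ===== SOURCE A (Python) =====
-- def maximumBinaryString(binary: str) -> str:
--     n = len(binary)
--     starting = 0
--     while starting < n and binary[starting] == '1':
--         starting += 1
--     if starting == n:
--         return binary
--     ones = binary[starting:].count('1')
--     return '1' * (n - ones - 1) + '0' + '1' * ones
-- ===== SOURCE B (Python) =====
-- def maximumBinaryString(binary: str) -> str:
--     # One-pass in-place simulation: keep a pointer k at the current zero-bit;
--     # each later zero is merged into it (rule 00->10 after sliding it left with rule 10->01),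
--     # which moves the zero pointer one step right.
--     s = list(binary)
--     k = -1
--     for i, c in enumerate(binary):
--         if c != '1':
--             if k == -1:
--                 k = i
--             else:
--                 s[i] = '1'
--                 s[k] = '1'
--                 k += 1
--                 s[k] = '0'
--     return ''.join(s)
-- ===== Notes on version B (the rewrite author's own statement) =====
-- stated objective: alternative
-- what changed: B replaces A's leading-ones scan + suffix count + three-part string concatenation by a single in-place pass over a char list that keeps a pointer to the current zero bit and merges every later zero into it (directly simulating the allowed operations), overwriting cells as it goes.
-- outside the precondition, e.g. on maximumBinaryString('1x1'): A returns '101', B returns '1x1'; on maximumBinaryString('x'): A returns '0', B returns 'x'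
import Mathlib
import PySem

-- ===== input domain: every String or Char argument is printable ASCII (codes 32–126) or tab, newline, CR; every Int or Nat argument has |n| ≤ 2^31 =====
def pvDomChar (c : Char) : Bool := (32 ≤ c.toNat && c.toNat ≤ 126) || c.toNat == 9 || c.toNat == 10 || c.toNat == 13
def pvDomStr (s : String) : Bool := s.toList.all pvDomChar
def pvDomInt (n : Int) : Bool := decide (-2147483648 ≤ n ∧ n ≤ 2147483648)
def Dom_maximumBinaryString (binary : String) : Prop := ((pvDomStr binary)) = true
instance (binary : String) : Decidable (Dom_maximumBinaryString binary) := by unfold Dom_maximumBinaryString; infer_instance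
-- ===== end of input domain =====

-- B replaces A's prefix-scan + suffix-count + three-part concatenation by a single
-- in-place pass that merges each later zero into a moving zero pointer (simulating the
-- allowed operations directly); objective: alternative algorithm, same O(n) cost.

-- ===== PORT A =====
-- A's while loop 'while starting < n and binary[starting] == "1"' transliterated as
-- structural recursion over the character list (exact: counts the leading '1's).
def pvALead : List Char → Nat
  | [] => 0
  | c :: cs => if c = '1' then pvALead cs + 1 else 0

def maximumBinaryString (binary : String) : String :=
  let l := binary.toList
  let n := l.length
  let starting := pvALead l
  if starting = n then binary
  else
    -- ones = binary[starting:].count('1')  (slice with in-range nonnegative start = drop)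
    let ones := (l.drop starting).count '1'
    String.ofList (List.replicate (n - ones - 1) '1' ++ ['0'] ++ List.replicate ones '1')

-- ===== PORT B =====
-- loop body of 'for i, c in enumerate(binary)': state = (list s, zero pointer k)
def pvStep (p : List Char × Int) (ic : Int × Char) : List Char × Int :=
  if ic.2 ≠ '1' then
    if p.2 = -1 then (p.1, ic.1)
    else
      let s1 := PySem.List.pySetD p.1 ic.1 '1'       -- s[i] = '1'
      let s2 := PySem.List.pySetD s1 p.2 '1'         -- s[k] = '1'
      (PySem.List.pySetD s2 (p.2 + 1) '0', p.2 + 1)  -- k += 1; s[k] = '0'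
  else p

def maximumBinaryString_alt (binary : String) : String :=
  let s := binary.toList
  String.ofList ((PySem.List.enumerate binary.toList).foldl pvStep (s, -1)).1

-- ===== PRECONDITION & SPEC =====
-- Pre_ excludes strings whose unique non-'1' character is not '0' (e.g. "1x1"): the
-- function is specified on binary strings only, and on that corner A rewrites the stray
-- character to '0' while B leaves the string unchanged — both accidental, neither specified.
def Pre_maximumBinaryString (binary : String) : Prop :=
  (binary.toList.filter (fun c => c ≠ '1')).length = 1 →
    binary.toList.filter (fun c => c ≠ '1') = ['0']
instance (binary : String) : Decidable (Pre_maximumBinaryString binary) := by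
  unfold Pre_maximumBinaryString; infer_instance

def pvWitness_maximumBinaryString : String := "0110"

def Spec_maximumBinaryString (binary : String) (out : String) : Prop :=
  out = maximumBinaryString_alt binary
instance (binary : String) (out : String) : Decidable (Spec_maximumBinaryString binary out) := by
  unfold Spec_maximumBinaryString; infer_instance

-- ===== CLAIM =====
def Claim_equal_maximumBinaryString : Prop :=
  ∀ (binary : String), Dom_maximumBinaryString binary → Pre_maximumBinaryString binary →
    Spec_maximumBinaryString binary (maximumBinaryString binary)

-- ===== LEMMAS AND PROOFS =====

theorem pvALead_le (l : List Char) : pvALead l ≤ l.length := by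
  induction l with
  | nil => simp [pvALead]
  | cons c cs ih => simp only [pvALead, List.length_cons]; split <;> omega

theorem pvALead_take (l : List Char) : l.take (pvALead l) = List.replicate (pvALead l) '1' := by
  induction l with
  | nil => simp [pvALead]
  | cons c cs ih =>
    by_cases hc : c = '1'
    · subst hc; simp [pvALead, List.replicate_succ, ih]
    · simp [pvALead, hc]

theorem pvALead_head (l : List Char) (h : pvALead l < l.length) :
    ∃ d rest, l.drop (pvALead l) = d :: rest ∧ d ≠ '1' := by
  induction l with
  | nil => simp at h
  | cons c cs ih =>
    by_cases hc : c = '1'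
    · subst hc
      obtain ⟨d, rest, hd, hne⟩ := ih (by simpa [pvALead, List.length_cons] using h)
      exact ⟨d, rest, by simpa [pvALead] using hd, hne⟩
    · exact ⟨c, cs, by simp [pvALead, hc], hc⟩

-- phase 1: steps on '1'-characters do nothing
theorem pvFold_ones (m : Nat) (j : Int) (st : List Char × Int) :
    (PySem.List.enumerate (List.replicate m '1') j).foldl pvStep st = st := by
  induction m generalizing j with
  | zero => simp [PySem.List.enumerate_nil]
  | succ m ih => simp [List.replicate_succ, PySem.List.enumerate_cons, pvStep, ih]

-- phase 2 helpers and merging loop invariant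
theorem pvSetAt (u : List Char) (x y : Char) (v : List Char) :
    (u ++ x :: v).set u.length y = u ++ y :: v := by
  induction u with
  | nil => rfl
  | cons a u ih => simp [List.set_cons_succ, ih]

theorem pvSetRep (p m : Nat) (v : List Char) (h : p < m) :
    (List.replicate m '1' ++ v).set p '0'
      = List.replicate p '1' ++ '0' :: (List.replicate (m - p - 1) '1' ++ v) := by
  induction p generalizing m with
  | zero =>
    obtain ⟨m', rfl⟩ : ∃ m', m = m' + 1 := ⟨m - 1, by omega⟩
    simp [List.replicate_succ]
  | succ p ih =>
    obtain ⟨m', rfl⟩ : ∃ m', m = m' + 1 := ⟨m - 1, by omega⟩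
    have e : m' + 1 - (p + 1) - 1 = m' - p - 1 := by omega
    simp only [List.replicate_succ, List.cons_append, List.set_cons_succ, ih m' (by omega), e]

theorem pvRepShift (m : Nat) (x : Char) (t : List Char) :
    List.replicate m x ++ x :: t = x :: (List.replicate m x ++ t) := by
  induction m with
  | zero => rfl
  | succ m ih => simp [List.replicate_succ, ih]

theorem pvAllOnes (t : List Char) (h : t.countP (fun c => c ≠ '1') = 0) :
    t = List.replicate t.length '1' := by
  induction t with
  | nil => rfl
  | cons c cs ih =>
    simp only [List.countP_cons] at h
    by_cases hc : c = '1'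
    · subst hc
      simp only [List.length_cons, List.replicate_succ]
      exact congrArg _ (ih (by omega))
    · simp [hc] at h

theorem pvFold_merge (t : List Char) (i k : Nat) (d : Char) (hk : k < i) (hd : d ≠ '1') :
    (PySem.List.enumerate t (i : Int)).foldl pvStep
      (List.replicate k '1' ++ d :: (List.replicate (i - k - 1) '1' ++ t), (k : Int))
    = (if t.countP (fun c => c ≠ '1') = 0 then
        (List.replicate k '1' ++ d :: (List.replicate (i - k - 1) '1' ++ t), (k : Int))
      else
        (List.replicate (k + t.countP (fun c => c ≠ '1')) '1' ++
          '0' :: List.replicate (i - k - 1 + (t.length - t.countP (fun c => c ≠ '1'))) '1',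
         ((k + t.countP (fun c => c ≠ '1') : Nat) : Int))) := by
  induction t generalizing i k d with
  | nil => simp [PySem.List.enumerate_nil]
  | cons c t' ih =>
    rw [PySem.List.enumerate_cons, List.foldl_cons]
    have hcast : (i : Int) + 1 = ((i + 1 : Nat) : Int) := by push_cast; ring
    have hm' : t'.countP (fun c => c ≠ '1') ≤ t'.length := List.countP_le_length
    by_cases hc : c = '1'
    · subst hc
      rw [show pvStep (List.replicate k '1' ++ d :: (List.replicate (i - k - 1) '1' ++ ('1' :: t')), (k : Int)) ((i : Int), '1')
          = (List.replicate k '1' ++ d :: (List.replicate (i - k - 1) '1' ++ ('1' :: t')), (k : Int)) from by simp [pvStep]]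
      have hre : List.replicate (i - k - 1) '1' ++ '1' :: t' = List.replicate (i + 1 - k - 1) '1' ++ t' := by
        rw [show i + 1 - k - 1 = (i - k - 1) + 1 from by omega, List.replicate_succ']
        simp
      rw [hre, hcast, ih (i + 1) k d (by omega) hd]
      rw [show List.countP (fun c => decide (c ≠ '1')) ('1' :: t') = List.countP (fun c => decide (c ≠ '1')) t' from by simp]
      split
      · rfl
      · rw [show ('1' :: t').length = t'.length + 1 from rfl,
            show i - k - 1 + (t'.length + 1 - List.countP (fun c => decide (c ≠ '1')) t')
               = i + 1 - k - 1 + (t'.length - List.countP (fun c => decide (c ≠ '1')) t') from by omega]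
    · -- merge step: s[i]='1'; s[k]='1'; k+=1; s[k]='0'
      have hknn : ¬ ((k : Int) = -1) := by omega
      have hk1 : ((k : Int) + 1) = ((k + 1 : Nat) : Int) := by push_cast; ring
      have hstep : pvStep (List.replicate k '1' ++ d :: (List.replicate (i - k - 1) '1' ++ c :: t'), (k : Int)) ((i : Int), c)
          = ((((List.replicate k '1' ++ d :: (List.replicate (i - k - 1) '1' ++ c :: t')).set i '1').set k '1').set (k + 1) '0',
             ((k + 1 : Nat) : Int)) := by
        simp only [pvStep, if_pos hc, if_neg hknn, hk1, PySem.List.pySetD_natCast]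
      rw [hstep]
      have h1 : ((List.replicate k '1' ++ d :: (List.replicate (i - k - 1) '1' ++ c :: t')).set i '1')
          = List.replicate k '1' ++ d :: (List.replicate (i - k - 1) '1' ++ '1' :: t') := by
        have hu : i = (List.replicate k '1' ++ d :: List.replicate (i - k - 1) '1').length := by
          simp [List.length_append, List.length_replicate]; omega
        calc (List.replicate k '1' ++ d :: (List.replicate (i - k - 1) '1' ++ c :: t')).set i '1'
            = ((List.replicate k '1' ++ d :: List.replicate (i - k - 1) '1') ++ c :: t').set
                (List.replicate k '1' ++ d :: List.replicate (i - k - 1) '1').length '1' := by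
              rw [← hu]; simp [List.append_assoc]
          _ = (List.replicate k '1' ++ d :: List.replicate (i - k - 1) '1') ++ '1' :: t' := pvSetAt _ _ _ _
          _ = List.replicate k '1' ++ d :: (List.replicate (i - k - 1) '1' ++ '1' :: t') := by
              simp
      rw [h1]
      have h2 : (List.replicate k '1' ++ d :: (List.replicate (i - k - 1) '1' ++ '1' :: t')).set k '1'
          = List.replicate (i + 1) '1' ++ t' := by
        have hs := pvSetAt (List.replicate k '1') d '1' (List.replicate (i - k - 1) '1' ++ '1' :: t')
        simp only [List.length_replicate] at hs
        rw [hs, show i + 1 = k + (1 + ((i - k - 1) + 1)) from by omega]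
        rw [List.replicate_add, List.replicate_add, List.replicate_succ, List.replicate_succ]
        simp only [pvRepShift, List.cons_append, List.cons.injEq, true_and]
        simp only [List.replicate_zero, List.nil_append]
        rw [List.append_assoc]
      rw [h2]
      rw [pvSetRep (k + 1) (i + 1) t' (by omega)]
      rw [show i + 1 - (k + 1) - 1 = (i + 1) - (k + 1) - 1 from rfl]
      rw [hcast, ih (i + 1) (k + 1) '0' (by omega) (by decide)]
      rw [show List.countP (fun c => decide (c ≠ '1')) (c :: t')
            = List.countP (fun c => decide (c ≠ '1')) t' + 1 from by simp [hc]]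
      rw [if_neg (by omega : ¬ (List.countP (fun c => decide (c ≠ '1')) t' + 1 = 0))]
      by_cases hm0 : List.countP (fun c => decide (c ≠ '1')) t' = 0
      · rw [if_pos hm0, hm0]
        have ht' := pvAllOnes t' hm0
        rw [show i + 1 - (k + 1) - 1 = i - k - 1 from by omega]
        have e3 : i - k - 1 + ((c :: t').length - (0 + 1)) = i - k - 1 + t'.length := by
          simp only [List.length_cons]; omega
        rw [e3, List.replicate_add (i - k - 1) t'.length '1', ← ht']
      · rw [if_neg hm0]
        have e1 : k + 1 + List.countP (fun c => decide (c ≠ '1')) t'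
            = k + (List.countP (fun c => decide (c ≠ '1')) t' + 1) := by omega
        have e2 : i + 1 - (k + 1) - 1 + (t'.length - List.countP (fun c => decide (c ≠ '1')) t')
            = i - k - 1 + ((c :: t').length - (List.countP (fun c => decide (c ≠ '1')) t' + 1)) := by
          simp only [List.length_cons]; omega
        rw [e1, e2]

theorem pvCountSplit (t : List Char) :
    t.length = t.count '1' + t.countP (fun c => c ≠ '1') := by
  induction t with
  | nil => simp
  | cons c cs ih =>
    by_cases hc : c = '1' <;>
      simp [hc, ih] <;> omega

-- ===== VERDICT =====
theorem maximumBinaryString_spec : Claim_equal_maximumBinaryString := by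
  intro binary _ hpre
  show maximumBinaryString binary = maximumBinaryString_alt binary
  unfold maximumBinaryString maximumBinaryString_alt
  simp only []
  set l := binary.toList with hl
  by_cases h : pvALead l = l.length
  · -- all '1's: A returns binary, B's loop never fires
    have hone : l = List.replicate l.length '1' := by
      have := pvALead_take l
      rw [h, List.take_length] at this
      exact this
    rw [if_pos h]
    rw [show PySem.List.enumerate l 0 = PySem.List.enumerate (List.replicate l.length '1') 0 from by rw [← hone]]
    rw [pvFold_ones]
    exact String.ofList_toList.symm
  · have hlt : pvALead l < l.length := lt_of_le_of_ne (pvALead_le l) h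
    obtain ⟨d, rest, hdrop, hd⟩ := pvALead_head l hlt
    rw [if_neg h]
    obtain ⟨a, ha⟩ : ∃ a, pvALead l = a := ⟨_, rfl⟩
    rw [ha] at hlt hdrop ⊢
    have hsplit : l = List.replicate a '1' ++ d :: rest := by
      conv_lhs => rw [← List.take_append_drop (pvALead l) l]
      rw [pvALead_take, ha, hdrop]
    have hlen : l.length = a + 1 + rest.length := by
      conv_lhs => rw [hsplit]
      simp [List.length_append]; omega
    -- B's fold: skip the '1'-prefix, grab the first marker, then merge
    have hfold : (PySem.List.enumerate l 0).foldl pvStep (l, -1)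
        = (PySem.List.enumerate rest ((a + 1 : Nat) : Int)).foldl pvStep
            (List.replicate a '1' ++ d :: (List.replicate (a + 1 - a - 1) '1' ++ rest),
             ((a : Nat) : Int)) := by
      conv_lhs => rw [show PySem.List.enumerate l 0 = PySem.List.enumerate (List.replicate a '1' ++ d :: rest) 0 from by rw [← hsplit]]
      rw [PySem.List.enumerate_append, List.foldl_append, pvFold_ones, PySem.List.enumerate_cons,
          List.foldl_cons]
      rw [show pvStep (l, -1) (0 + ↑(List.replicate a '1').length, d) = (l, ((a : Nat) : Int)) from by
        simp [pvStep, hd]]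
      rw [show (0 + ↑(List.replicate a '1').length + 1 : Int) = ((a + 1 : Nat) : Int) from by
        push_cast; simp]
      rw [show a + 1 - a - 1 = 0 from by omega]
      simp only [List.replicate_zero, List.nil_append]
      conv_lhs => rw [hsplit]
    rw [hfold, pvFold_merge rest (a + 1) a d (by omega) hd]
    have hones : (l.drop a).count '1' = rest.count '1' := by
      rw [hdrop, List.count_cons]
      simp [hd]
    rw [hones]
    have hmle : rest.countP (fun c => c ≠ '1') ≤ rest.length := List.countP_le_length
    have hcs := pvCountSplit rest
    by_cases hm0 : rest.countP (fun c => c ≠ '1') = 0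
    · -- no further markers: Pre_ forces d = '0'
      rw [if_pos hm0]
      have hfr : rest.filter (fun c => (c ≠ '1')) = [] := by
        rw [← List.length_eq_zero_iff, ← List.countP_eq_length_filter]
        exact hm0
      have hfl : l.filter (fun c => c ≠ '1') = [d] := by
        conv_lhs => rw [hsplit]
        rw [List.filter_append, List.filter_cons, hfr]
        simp [hd]
      have hd0 : d = '0' := by
        have := hpre (by rw [← hl, hfl]; rfl)
        rw [← hl, hfl] at this
        simpa using this
      have hrest : rest = List.replicate rest.length '1' := pvAllOnes rest hm0
      have hco : rest.count '1' = rest.length := by omega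
      rw [hco, show l.length - rest.length - 1 = a from by omega]
      congr 1
      rw [hd0, hrest]
      simp
    · rw [if_neg hm0]
      have hco : rest.count '1' = rest.length - rest.countP (fun c => c ≠ '1') := by omega
      rw [hco]
      rw [show l.length - (rest.length - rest.countP (fun c => c ≠ '1')) - 1
            = a + rest.countP (fun c => c ≠ '1') from by omega,
          show a + 1 - a - 1 + (rest.length - rest.countP (fun c => c ≠ '1'))
            = rest.length - rest.countP (fun c => c ≠ '1') from by omega]
      simp
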